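-- pv_equiv track=rewrite | github.com/AlisonLuan/bmp2c | src/bmp2c/gui.py | _translate_grid
-- ===== SOURCE A (Python) =====
-- def _translate_grid(grid: list[list[int]], dx: int, dy: int) -> list[list[int]]:
--     """
--     Translate the bitmap by integer pixels (dx, dy).
--     Pixels shifted out are dropped; vacated area becomes white (0).
--     Returns a new grid of the same size.
--     """
--     h = len(grid)
--     w = len(grid[0]) if h else 0
--     if w == 0 or h == 0 or (dx == 0 and dy == 0):
--         return [row[:] for row in grid]
--
--     out = [[0 for _ in range(w)] for _ in range(h)]
--     for y in range(h):
--         src_y = y - dy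
--         if 0 <= src_y < h:
--             row_out = out[y]
--             row_src = grid[src_y]
--             for x in range(w):
--                 src_x = x - dx
--                 if 0 <= src_x < w:
--                     row_out[x] = row_src[src_x]
--     return out
-- ===== SOURCE B (Python) =====
-- def _shift_row(row, dx, w):
--     """Row shifted right by dx within width w, built by slice-and-pad."""
--     if dx >= 0:
--         return [0] * min(dx, w) + row[: max(w - dx, 0)]
--     s = -dx
--     return row[s:w] + [0] * min(s, w)
--
--
-- def _translate_grid(grid, dx, dy):
--     h = len(grid)
--     w = len(grid[0]) if h else 0
--     if w == 0 or h == 0 or (dx == 0 and dy == 0):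
--         return [row[:] for row in grid]
--     zero_row = [0] * w
--     if dy >= 0:
--         mid = [zero_row] * min(dy, h) + grid[: max(h - dy, 0)]
--     else:
--         s = -dy
--         mid = grid[s:h] + [zero_row] * min(s, h)
--     return [_shift_row(row, dx, w) for row in mid]
-- ===== Notes on version B (the rewrite author's own statement) =====
-- stated objective: alternative
-- what changed: Replaces A's fused per-pixel double loop (nested y/x loops writing into a preallocated zero grid) by two separable 1D passes built from slices: a vertical shift of the row list (slice plus zero-row padding) followed by a horizontal shift of each row (one slice plus zero padding), with no per-pixel indexing at all.
import Mathlib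
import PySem

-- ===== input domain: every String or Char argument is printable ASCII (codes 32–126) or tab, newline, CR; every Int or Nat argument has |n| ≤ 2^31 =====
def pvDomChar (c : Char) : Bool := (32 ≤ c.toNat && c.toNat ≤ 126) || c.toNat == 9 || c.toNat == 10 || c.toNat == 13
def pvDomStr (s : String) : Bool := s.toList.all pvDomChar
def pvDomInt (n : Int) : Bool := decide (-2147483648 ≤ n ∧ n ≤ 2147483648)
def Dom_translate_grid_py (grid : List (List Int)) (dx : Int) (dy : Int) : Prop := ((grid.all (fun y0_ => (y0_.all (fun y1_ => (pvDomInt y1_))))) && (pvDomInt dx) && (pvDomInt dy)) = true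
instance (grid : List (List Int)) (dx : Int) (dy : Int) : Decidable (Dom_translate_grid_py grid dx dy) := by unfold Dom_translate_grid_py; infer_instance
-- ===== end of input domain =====

-- B replaces A's fused per-pixel double loop by two separable 1D slice-and-pad passes (vertical shift
-- of the row list, then a horizontal shift of each row built from one slice plus zero padding):
-- same output, a different decomposition ("alternative").

-- ===== PORT A =====
-- literal transliteration of A's nested per-pixel loops; out starts as a zero grid, rows the loop
-- writes become maps over range(w), untouched rows stay List.replicate w 0.
def translate_grid_py (grid : List (List Int)) (dx : Int) (dy : Int) : List (List Int) :=
  let h := grid.length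
  let w := if h ≠ 0 then (grid.headD []).length else 0
  if w = 0 ∨ h = 0 ∨ (dx = 0 ∧ dy = 0) then grid.map (fun row => row)
  else
    (List.range h).map (fun (y : Nat) =>
      if 0 ≤ (y : Int) - dy ∧ (y : Int) - dy < (h : Int) then
        (List.range w).map (fun (x : Nat) =>
          if 0 ≤ (x : Int) - dx ∧ (x : Int) - dx < (w : Int) then
            (grid.getD ((y : Int) - dy).toNat []).getD ((x : Int) - dx).toNat 0
          else 0)
      else List.replicate w 0)

-- ===== PORT B =====
-- transliteration of Source B's _shift_row: one slice plus zero padding.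
def pvShiftRowB (row : List Int) (dx : Int) (w : Nat) : List Int :=
  if 0 ≤ dx then
    List.replicate (min dx.toNat w) 0 ++ PySem.List.slice row none (some (max ((w : Int) - dx) 0))
  else
    PySem.List.slice row (some (-dx)) (some (w : Int)) ++ List.replicate (min (-dx).toNat w) 0

def translate_grid_py_alt (grid : List (List Int)) (dx : Int) (dy : Int) : List (List Int) :=
  let h := grid.length
  let w := if h ≠ 0 then (grid.headD []).length else 0
  if w = 0 ∨ h = 0 ∨ (dx = 0 ∧ dy = 0) then grid.map (fun row => row)
  else
    let zeroRow : List Int := List.replicate w 0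
    let mid :=
      if 0 ≤ dy then
        List.replicate (min dy.toNat h) zeroRow ++ PySem.List.slice grid none (some (max ((h : Int) - dy) 0))
      else
        PySem.List.slice grid (some (-dy)) (some (h : Int)) ++ List.replicate (min (-dy).toNat h) zeroRow
    mid.map (fun row => pvShiftRowB row dx w)

-- ===== PRECONDITION & SPEC =====
-- Pre_ excludes exactly the inputs on which A raises IndexError: ragged grids where some row the
-- translation actually reads is shorter than a column index the shift reads from it (column indices
-- run up to the width w = len(grid[0])).
def Pre_translate_grid_py (grid : List (List Int)) (dx : Int) (dy : Int) : Prop :=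
  (dx = 0 ∧ dy = 0) ∨
  (∀ sy < grid.length, ∀ sx < (grid.headD []).length,
    (0 ≤ (sy : Int) + dy ∧ (sy : Int) + dy < (grid.length : Int) ∧
     0 ≤ (sx : Int) + dx ∧ (sx : Int) + dx < ((grid.headD []).length : Int)) →
    sx < (grid.getD sy []).length)
instance (grid : List (List Int)) (dx : Int) (dy : Int) : Decidable (Pre_translate_grid_py grid dx dy) := by unfold Pre_translate_grid_py; infer_instance

def pvWitness_translate_grid_py : List (List Int) × Int × Int := ([[1, 0], [0, 1]], 1, 0)

def Spec_translate_grid_py (grid : List (List Int)) (dx : Int) (dy : Int) (out : List (List Int)) : Prop := out = translate_grid_py_alt grid dx dy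
instance (grid : List (List Int)) (dx : Int) (dy : Int) (out : List (List Int)) : Decidable (Spec_translate_grid_py grid dx dy out) := by unfold Spec_translate_grid_py; infer_instance

-- ===== CLAIM (what is proved, stated in full; the proofs are below) =====
def Claim_equal_translate_grid_py : Prop := ∀ (grid : List (List Int)) (dx : Int) (dy : Int), Dom_translate_grid_py grid dx dy → Pre_translate_grid_py grid dx dy → Spec_translate_grid_py grid dx dy (translate_grid_py grid dx dy)

-- ===== LEMMAS AND PROOFS =====

-- A slice-and-pad shift of a list equals the indexwise shifted list, provided every index the
-- indexwise form reads exists; used for B's horizontal pass (d = 0) and vertical pass (d = zero row).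
theorem pvShiftPad_eq {α : Type} (xs : List α) (d : α) (s : Int) (n : Nat)
    (hlen : ∀ k < n, (0 ≤ (k : Int) + s ∧ (k : Int) + s < (n : Int)) → k < xs.length) :
    (if 0 ≤ s then
      List.replicate (min s.toNat n) d ++ PySem.List.slice xs none (some (max ((n : Int) - s) 0))
    else
      PySem.List.slice xs (some (-s)) (some (n : Int)) ++ List.replicate (min (-s).toNat n) d) =
    (List.range n).map (fun (y : Nat) =>
      if 0 ≤ (y : Int) - s ∧ (y : Int) - s < (n : Int) then xs.getD ((y : Int) - s).toNat d else d) := by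
  split_ifs with hs
  · rw [PySem.List.slice_to xs (by omega)]
    have hm : (max ((n : Int) - s) 0).toNat = n - s.toNat := by omega
    rw [hm]
    have hlen' : n - s.toNat ≤ xs.length := by
      by_cases hlt : s.toNat < n
      · have := hlen (n - 1 - s.toNat) (by omega) (by constructor <;> omega)
        omega
      · omega
    apply List.ext_getElem
    · simp; omega
    · intro i h1 h2
      simp only [List.getElem_map, List.getElem_range]
      rw [List.getElem_append]
      simp only [List.length_replicate, List.getElem_replicate, List.getElem_take]
      have hin : i < n := by simpa using h2
      split_ifs with h3 h4 h4
      · exfalso; rcases h4 with ⟨ha, _⟩; omega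
      · rfl
      · have h5 : ((i : Int) - s).toNat = i - min s.toNat n := by omega
        rw [h5, List.getD_eq_getElem _ _ (by omega)]
      · exfalso; apply h4; constructor <;> omega
  · rw [PySem.List.slice_toNat xs (by omega) (by omega)]
    have hnt : ((n : Int)).toNat = n := by omega
    rw [hnt]
    have hlen' : n - (-s).toNat ≤ xs.length - (-s).toNat ∨ n ≤ (-s).toNat := by
      by_cases hlt : (-s).toNat < n
      · left
        have := hlen (n - 1) (by omega) (by constructor <;> omega)
        omega
      · right; omega
    apply List.ext_getElem
    · simp; omega
    · intro i h1 h2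
      simp only [List.getElem_map, List.getElem_range]
      rw [List.getElem_append]
      simp only [List.length_take, List.length_drop, List.getElem_take, List.getElem_drop,
        List.getElem_replicate]
      have hin : i < n := by simpa using h2
      split_ifs with h3 h4 h4
      · have hix : (-s).toNat + i < xs.length := by
          have := hlen ((-s).toNat + i) (by omega) (by constructor <;> omega)
          omega
        have hidx : ((i : Int) - s).toNat = (-s).toNat + i := by omega
        rw [hidx, List.getD_eq_getElem _ _ hix]
      · exfalso; apply h4; constructor <;> omega
      · exfalso; rcases h4 with ⟨ha, hb⟩; rcases hlen' with hc | hc <;> omega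
      · rfl

theorem pvShiftRowB_eq (row : List Int) (dx : Int) (w : Nat)
    (hrow : ∀ sx < w, (0 ≤ (sx : Int) + dx ∧ (sx : Int) + dx < (w : Int)) → sx < row.length) :
    pvShiftRowB row dx w =
      (List.range w).map (fun (x : Nat) =>
        if 0 ≤ (x : Int) - dx ∧ (x : Int) - dx < (w : Int) then row.getD ((x : Int) - dx).toNat 0 else 0) :=
  pvShiftPad_eq row 0 dx w hrow

-- shifting the all-zero row gives it back
theorem pvShiftRowB_replicate (dx : Int) (w : Nat) :
    pvShiftRowB (List.replicate w 0) dx w = List.replicate w 0 := by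
  rw [pvShiftRowB_eq _ _ _ (fun k hk _ => by simpa using hk)]
  apply List.ext_getElem
  · simp
  · intro i h1 h2
    simp only [List.getElem_map, List.getElem_range, List.getElem_replicate]
    split_ifs with h
    · rw [List.getD_eq_getElem _ _ (by simp; omega)]
      simp
    · rfl

-- the else branches of the two ports agree under Pre_
theorem pvElse_eq (grid : List (List Int)) (dx dy : Int)
    (hpre : Pre_translate_grid_py grid dx dy)
    (hne : ¬((grid.headD []).length = 0 ∨ grid.length = 0 ∨ (dx = 0 ∧ dy = 0))) :
    (List.range grid.length).map (fun (y : Nat) =>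
      if 0 ≤ (y : Int) - dy ∧ (y : Int) - dy < (grid.length : Int) then
        (List.range (grid.headD []).length).map (fun (x : Nat) =>
          if 0 ≤ (x : Int) - dx ∧ (x : Int) - dx < ((grid.headD []).length : Int) then
            (grid.getD ((y : Int) - dy).toNat []).getD ((x : Int) - dx).toNat 0
          else 0)
      else List.replicate (grid.headD []).length 0) =
    (if 0 ≤ dy then
      List.replicate (min dy.toNat grid.length) (List.replicate (grid.headD []).length 0) ++
        PySem.List.slice grid none (some (max ((grid.length : Int) - dy) 0))
    else
      PySem.List.slice grid (some (-dy)) (some (grid.length : Int)) ++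
        List.replicate (min (-dy).toNat grid.length) (List.replicate (grid.headD []).length 0)).map
      (fun row => pvShiftRowB row dx (grid.headD []).length) := by
  have hp : ∀ sy < grid.length, ∀ sx < (grid.headD []).length,
      (0 ≤ (sy : Int) + dy ∧ (sy : Int) + dy < (grid.length : Int) ∧
       0 ≤ (sx : Int) + dx ∧ (sx : Int) + dx < ((grid.headD []).length : Int)) →
      sx < (grid.getD sy []).length := by
    rcases hpre with ⟨h1, h2⟩ | hp
    · exact absurd (Or.inr (Or.inr ⟨h1, h2⟩)) hne
    · exact hp
  rw [pvShiftPad_eq grid (List.replicate (grid.headD []).length 0) dy grid.length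
        (fun k hk _ => hk), List.map_map]
  apply List.map_congr_left
  intro y hy
  have hyh : y < grid.length := List.mem_range.mp hy
  simp only [Function.comp]
  split_ifs with hv
  · have hsy : ((y : Int) - dy).toNat < grid.length := by omega
    have hrow : ∀ sx < (grid.headD []).length,
        (0 ≤ (sx : Int) + dx ∧ (sx : Int) + dx < ((grid.headD []).length : Int)) →
        sx < (grid.getD ((y : Int) - dy).toNat (List.replicate (grid.headD []).length 0)).length := by
      intro sx hsx hcond
      have := hp ((y : Int) - dy).toNat hsy sx hsx
        (by refine ⟨by omega, by omega, hcond.1, hcond.2⟩)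
      rwa [List.getD_eq_getElem _ _ hsy,
        ← List.getD_eq_getElem _ (List.replicate (grid.headD []).length 0) hsy] at this
    rw [pvShiftRowB_eq _ _ _ hrow]
    apply List.map_congr_left
    intro x hx
    split_ifs with hc
    · rw [List.getD_eq_getElem _ _ hsy, List.getD_eq_getElem _ _ hsy]
    · rfl
  · exact (pvShiftRowB_replicate dx (grid.headD []).length).symm

-- ===== VERDICT (by name: the statement is the Claim_ definition above) =====
theorem translate_grid_py_spec : Claim_equal_translate_grid_py := by
  intro grid dx dy _dom hpre
  unfold Spec_translate_grid_py translate_grid_py translate_grid_py_alt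
  by_cases hh0 : grid.length = 0
  · simp [hh0]
  · have hwid : (if grid.length ≠ 0 then (grid.headD []).length else 0) = (grid.headD []).length :=
      if_pos hh0
    simp only [hwid]
    by_cases hg : (grid.headD []).length = 0 ∨ grid.length = 0 ∨ (dx = 0 ∧ dy = 0)
    · rw [if_pos hg, if_pos hg]
    · rw [if_neg hg, if_neg hg]
      exact pvElse_eq grid dx dy hpre hg
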